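-- pv_equiv track=rewrite | github.com/mishagreh/CodewarsKatasProject | 6kyu/Consonant_value.py | solve
-- ===== SOURCE A (Python) =====
-- def solve(string):
--     """ returns sum2 counter of the longest consonant series. Sum1 is an intermediary counter """
--
--     dict = {'b': 2, 'c': 3, 'd': 4, 'f': 6, 'g': 7, 'h': 8, 'j': 10, 'k': 11, 'l': 12, 'm': 13, 'n': 14, 'p': 16,
--             'q': 17, 'r': 18, 's': 19, 't': 20, 'v': 22, 'w': 23, 'x': 24, 'y': 25, 'z': 26}
--
--     sum1 = 0
--     sum2 = 0
--
--     for i in string: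
--         if i not in "aeiou":
--             sum1 += dict[i]
--         else:
--             if sum1 > sum2:
--                 sum2 = sum1
--             sum1 = 0
--     if sum1 > sum2:
--         sum2, sum1 = sum1, 0
--
--     return sum2
-- ===== SOURCE B (Python) =====
-- def solve(string):
--     """Simpler: cut the string into consonant segments on vowels and value each
--     segment arithmetically (alphabet position ord(c)-96), no lookup table; max of
--     the segment values (0 if none)."""
--     segments = "".join(c if c not in "aeiou" else " " for c in string).split()
--     return max((sum(ord(c) - 96 for c in seg) for seg in segments), default=0)
-- ===== Notes on version B (the rewrite author's own statement) =====
-- stated objective: simpler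
-- what changed: Replaces A's running-accumulator-with-reset single pass and its 21-entry lookup dict by a split-into-consonant-segments (cut on vowels), value-each-segment-arithmetically (ord(c)-96), take-the-max decomposition.
-- outside the precondition, e.g. on solve('Ab'): A raises KeyError, B returns -29; on solve('b c'): A raises KeyError, B returns 3
import Mathlib
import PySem

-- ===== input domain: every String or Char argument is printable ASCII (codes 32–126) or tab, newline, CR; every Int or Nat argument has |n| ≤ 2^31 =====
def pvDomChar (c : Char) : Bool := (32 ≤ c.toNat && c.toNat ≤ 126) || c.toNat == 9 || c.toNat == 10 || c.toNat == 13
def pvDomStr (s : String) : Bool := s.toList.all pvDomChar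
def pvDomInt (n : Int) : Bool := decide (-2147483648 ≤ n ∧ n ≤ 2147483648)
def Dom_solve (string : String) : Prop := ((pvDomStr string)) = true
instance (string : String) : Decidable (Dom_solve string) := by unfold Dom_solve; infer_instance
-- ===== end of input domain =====

-- B replaces A's running-accumulator-with-reset pass and its lookup dict by a
-- split-on-vowels-into-segments, value-each-segment-arithmetically (ord(c)-96),
-- take-the-max decomposition (objective: simpler).


-- ===== PORT A =====
-- the consonant-value dict A defines literally
def consDict : PySem.Dict Char Int := PySem.Dict.ofList
  [('b', 2), ('c', 3), ('d', 4), ('f', 6), ('g', 7), ('h', 8), ('j', 10), ('k', 11), ('l', 12),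
   ('m', 13), ('n', 14), ('p', 16), ('q', 17), ('r', 18), ('s', 19), ('t', 20), ('v', 22),
   ('w', 23), ('x', 24), ('y', 25), ('z', 26)]

-- dict[i]: the KeyError case (none) is excluded by Pre_solve, so the lookup totalizes with 0
def cval (c : Char) : Int := (PySem.Dict.get? consDict c).getD 0

-- i in "aeiou" (a single character: membership)
def isVowel (c : Char) : Bool := "aeiou".toList.contains c

-- loop body of A: sum1 += dict[i] on a consonant, else roll sum1 into sum2 and reset
def stepA (p : Int × Int) (i : Char) : Int × Int :=
  if ¬ isVowel i then (p.1 + cval i, p.2)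
  else (0, if p.1 > p.2 then p.1 else p.2)

-- A's final 'if sum1 > sum2: sum2, sum1 = sum1, 0; return sum2'
def finA (p : Int × Int) : Int := if p.1 > p.2 then p.1 else p.2

def solve (string : String) : Int := finA (string.toList.foldl stepA (0, 0))

-- ===== PORT B =====
-- sum(ord(c) - 96 for c in seg): no lookup table, the alphabet position
def segV (seg : List Char) : Int := (seg.map (fun c => (c.toNat : Int) - 96)).sum

def solve_alt (string : String) : Int :=
  let segments := PySem.Chars.split₀ (string.toList.map (fun c => if isVowel c then ' ' else c))
  PySem.List.maxD (segments.map segV) id 0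

-- ===== PRECONDITION & SPEC =====
-- Pre_ excludes exactly the strings with a character other than a lowercase letter a-z:
-- on those A raises KeyError at the first such non-vowel character.
def Pre_solve (string : String) : Prop :=
  (string.toList.all (fun c => 'a' ≤ c && c ≤ 'z')) = true
instance (string : String) : Decidable (Pre_solve string) := by unfold Pre_solve; infer_instance

def pvWitness_solve : String := "zodiacs"

def Spec_solve (string : String) (out : Int) : Prop := out = solve_alt string
instance (string : String) (out : Int) : Decidable (Spec_solve string out) := by unfold Spec_solve; infer_instance

-- ===== CLAIM (what is proved, stated in full; the proofs are below) =====
def Claim_equal_solve : Prop := ∀ (string : String), Dom_solve string → Pre_solve string → Spec_solve string (solve string)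

-- ===== LEMMAS AND PROOFS =====

-- A-side value of a segment, for the bridge proof
def segVA (seg : List Char) : Int := (seg.map cval).sum

def mh (s1 : Int) : List Char → Int
  | [] => s1
  | c :: t => if ¬ isVowel c then mh (s1 + cval c) t
              else if s1 > mh 0 t then s1 else mh 0 t
def runsAux : List Char → List Char → List (List Char)
  | [], cur => if cur.isEmpty then [] else [cur.reverse]
  | c :: t, cur => if isVowel c then
      (if cur.isEmpty then runsAux t [] else cur.reverse :: runsAux t [])
    else runsAux t (c :: cur)
def AllLet (l : List Char) : Prop := ∀ c ∈ l, 'a' ≤ c ∧ c ≤ 'z'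
-- every char of a produced segment is a lowercase consonant letter
def AllCons (l : List Char) : Prop := ∀ c ∈ l, ('a' ≤ c ∧ c ≤ 'z') ∧ isVowel c = false

lemma lemA (l : List Char) : ∀ s1 s2 : Int,
    finA (l.foldl stepA (s1, s2)) = if mh s1 l > s2 then mh s1 l else s2 := by
  induction l with
  | nil => intro s1 s2; simp [mh, finA]
  | cons c t ih =>
    intro s1 s2
    rw [List.foldl_cons]
    by_cases hv : isVowel c
    · have hs : stepA (s1, s2) c = (0, if s1 > s2 then s1 else s2) := by simp [stepA, hv]
      rw [hs, ih 0 (if s1 > s2 then s1 else s2)]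
      have := ih 0 s2
      show _ = if mh s1 (c :: t) > s2 then mh s1 (c :: t) else s2
      simp [mh, hv]
      split_ifs <;> omega
    · have hs : stepA (s1, s2) c = (s1 + cval c, s2) := by simp [stepA, hv]
      rw [hs, ih (s1 + cval c) s2]
      simp [mh, hv]

lemma isspace_letter {c : Char} (h1 : 'a' ≤ c) (h2 : c ≤ 'z') :
    PySem.Chars.isspace c = false := by
  have h1' : 97 ≤ c.toNat := h1
  have h2' : c.toNat ≤ 122 := h2
  simp [PySem.Chars.isspace]
  omega

lemma go_spec (l : List Char) : ∀ cur acc, AllLet l →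
    PySem.Chars.split₀.go (l.map (fun c => if isVowel c then ' ' else c)) cur acc
    = acc.reverse ++ runsAux l cur := by
  induction l with
  | nil => intro cur acc _; simp [PySem.Chars.split₀.go, runsAux]; split_ifs <;> simp
  | cons c t ih =>
    intro cur acc hl
    have hc := hl c (by simp)
    have ht : AllLet t := fun x hx => hl x (by simp [hx])
    simp only [List.map_cons, PySem.Chars.split₀.go, runsAux]
    by_cases hv : isVowel c
    · have hsp : PySem.Chars.isspace ' ' = true := by decide
      simp only [hv, if_true, hsp]
      by_cases hce : cur.isEmpty <;> simp [hce, ih _ _ ht]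
    · simp [hv, isspace_letter hc.1 hc.2, ih _ _ ht]

-- the produced segments contain only lowercase consonants
lemma runsAux_allcons (l : List Char) : ∀ cur, AllLet l → AllCons cur →
    ∀ seg ∈ runsAux l cur, AllCons seg := by
  induction l with
  | nil =>
    intro cur _ hcur seg hseg
    unfold runsAux at hseg
    split_ifs at hseg with h
    · exact absurd hseg (List.not_mem_nil)
    · simp only [List.mem_singleton] at hseg
      subst hseg
      intro c hc; exact hcur c (List.mem_reverse.mp hc)
  | cons c t ih =>
    intro cur hl hcur seg hseg
    have hc := hl c (by simp)
    have ht : AllLet t := fun x hx => hl x (by simp [hx])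
    unfold runsAux at hseg
    split_ifs at hseg with hv hce
    · exact ih [] ht (by intro x hx; exact absurd hx (List.not_mem_nil)) seg hseg
    · rcases List.mem_cons.mp hseg with h | h
      · subst h; intro x hx; exact hcur x (List.mem_reverse.mp hx)
      · exact ih [] ht (by intro x hx; exact absurd hx (List.not_mem_nil)) seg h
    · refine ih (c :: cur) ht ?_ seg hseg
      intro x hx
      rcases List.mem_cons.mp hx with h | h
      · subst h; exact ⟨hc, by simpa using hv⟩
      · exact hcur x h

-- on lowercase consonants the dict value is the alphabet position
lemma cval_ord {c : Char} (h1 : 'a' ≤ c) (h2 : c ≤ 'z') (hv : isVowel c = false) :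
    cval c = (c.toNat : Int) - 96 := by
  have h1' : 97 ≤ c.toNat := h1
  have h2' : c.toNat ≤ 122 := h2
  have key : ∀ n ∈ Finset.Icc 97 122,
      isVowel (Char.ofNat n) = true ∨ cval (Char.ofNat n) = (n : Int) - 96 := by decide
  have hofnat : Char.ofNat c.toNat = c := Char.ofNat_toNat c
  have := key c.toNat (Finset.mem_Icc.mpr ⟨h1', h2'⟩)
  rw [hofnat] at this
  rcases this with h | h
  · rw [h] at hv; exact absurd hv (by simp)
  · exact h

lemma segV_eq_segVA (seg : List Char) (h : AllCons seg) : segV seg = segVA seg := by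
  induction seg with
  | nil => rfl
  | cons c t ih =>
    have hc := h c (by simp)
    have ht : AllCons t := fun x hx => h x (by simp [hx])
    simp only [segV, segVA, List.map_cons, List.sum_cons] at *
    rw [ih ht, cval_ord hc.1.1 hc.1.2 hc.2]

lemma cval_nonneg2 (c : Char) : 0 ≤ cval c := by
  unfold cval
  cases h : PySem.Dict.get? consDict c with
  | none => simp
  | some v =>
    unfold PySem.Dict.get? at h
    obtain ⟨p, hfind, hp2⟩ := Option.map_eq_some_iff.mp h
    have hmem := List.mem_of_find?_eq_some hfind
    have hitems : consDict.items = [('b', (2:Int)), ('c', 3), ('d', 4), ('f', 6), ('g', 7), ('h', 8), ('j', 10), ('k', 11), ('l', 12),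
      ('m', 13), ('n', 14), ('p', 16), ('q', 17), ('r', 18), ('s', 19), ('t', 20), ('v', 22),
      ('w', 23), ('x', 24), ('y', 25), ('z', 26)] := by decide
    rw [hitems] at hmem
    fin_cases hmem <;> (rw [← hp2]; decide)

lemma segVA_nonneg (l : List Char) : 0 ≤ segVA l := by
  induction l with
  | nil => simp [segVA]
  | cons c t ih => simpa [segVA] using add_nonneg (cval_nonneg2 c) ih

lemma foldl_max_comm (t : List Int) : ∀ a b : Int,
    t.foldl max (max a b) = max a (t.foldl max b) := by
  induction t with
  | nil => intro a b; simp
  | cons z r ih =>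
    intro a b
    simp only [List.foldl_cons]
    rw [max_assoc, ih]

def mstep (acc : Option Int) (x : Int) : Option Int :=
  match acc with
  | none => some x
  | some m => if id m < id x then some x else some m

lemma mstep_go (t : List Int) : ∀ a : Int,
    t.foldl mstep (some a) = some (t.foldl max a) := by
  induction t with
  | nil => intro a; simp
  | cons y r ih =>
    intro a
    rw [List.foldl_cons, List.foldl_cons]
    by_cases h : a < y
    · rw [show mstep (some a) y = some y from by simp [mstep, h],
        ih, max_eq_right (le_of_lt h)]
    · rw [show mstep (some a) y = some a from by simp [mstep, h],
        ih, max_eq_left (le_of_not_gt h)]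

lemma max?_eq_foldl_mstep (t : List Int) :
    PySem.List.max? t id = t.foldl mstep none := by
  unfold PySem.List.max?
  congr 1
  funext acc x
  cases acc <;> rfl

lemma maxD_eq_foldl (rs : List Int) (h : ∀ x ∈ rs, 0 ≤ x) :
    PySem.List.maxD rs id 0 = rs.foldl max 0 := by
  cases rs with
  | nil => simp [PySem.List.maxD, PySem.List.max?]
  | cons x t =>
    have hx : max (0:Int) x = x := max_eq_right (h x (by simp))
    simp only [PySem.List.maxD]
    rw [max?_eq_foldl_mstep, List.foldl_cons, List.foldl_cons, hx,
      show mstep none x = some x from rfl, mstep_go]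
    rfl

lemma le_foldl_max0 (rs : List Int) : ∀ a : Int, a ≤ rs.foldl max a := by
  induction rs with
  | nil => intro a; simp
  | cons y r ih => intro a; exact le_trans (le_max_left a y) (ih (max a y))

lemma bridge (l : List Char) : ∀ cur : List Char,
    mh (segVA cur.reverse) l = ((runsAux l cur).map segVA).foldl max 0 := by
  induction l with
  | nil =>
    intro cur
    by_cases hce : cur.isEmpty
    · rw [List.isEmpty_iff.mp hce]; simp [mh, runsAux, segVA]
    · simp only [mh, runsAux, hce, Bool.false_eq_true, if_false, List.map_cons,
        List.map_nil, List.foldl_cons, List.foldl_nil]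
      exact (max_eq_right (segVA_nonneg _)).symm
  | cons c t ih =>
    intro cur
    by_cases hv : isVowel c
    · have hmh : mh (segVA cur.reverse) (c :: t)
          = if segVA cur.reverse > mh 0 t then segVA cur.reverse else mh 0 t := by
        simp [mh, hv]
      by_cases hce : cur.isEmpty
      · rw [List.isEmpty_iff.mp hce] at hmh ⊢
        rw [show runsAux (c :: t) [] = runsAux t [] from by simp [runsAux, hv], hmh]
        have h0 := ih []
        simp only [List.reverse_nil] at h0
        rw [show segVA ([] : List Char) = 0 from rfl] at h0
        have hnn : (0:Int) ≤ ((runsAux t []).map segVA).foldl max 0 := le_foldl_max0 _ 0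
        simp only [List.reverse_nil, show segVA ([] : List Char) = 0 from rfl]
        rw [← h0] at hnn ⊢
        split_ifs <;> omega
      · rw [show runsAux (c :: t) cur = cur.reverse :: runsAux t [] from by
          simp [runsAux, hv, hce], hmh]
        have h0 := ih []
        simp only [List.reverse_nil] at h0
        rw [show segVA ([] : List Char) = 0 from rfl] at h0
        rw [List.map_cons, List.foldl_cons, max_comm (0:Int) _, foldl_max_comm, ← h0,
          max_def]
        split_ifs <;> omega
    · rw [show mh (segVA cur.reverse) (c :: t) = mh (segVA cur.reverse + cval c) t from by
          simp [mh, hv],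
        show runsAux (c :: t) cur = runsAux t (c :: cur) from by simp [runsAux, hv],
        show segVA cur.reverse + cval c = segVA ((c :: cur).reverse) from by simp [segVA],
        ih (c :: cur)]

-- ===== VERDICT (by name: the statement is the Claim_ definition above) =====
theorem solve_spec : Claim_equal_solve := by
  intro s _ hpre
  unfold Pre_solve at hpre
  have hal : AllLet s.toList := by
    intro c hc
    have h := List.all_eq_true.mp hpre c hc
    simpa using h
  unfold Spec_solve solve solve_alt
  rw [lemA, PySem.Chars.split₀, go_spec s.toList [] [] hal]
  simp only [List.reverse_nil, List.nil_append]
  have hcons : ∀ seg ∈ runsAux s.toList [], AllCons seg :=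
    runsAux_allcons s.toList [] hal (by intro x hx; exact absurd hx (List.not_mem_nil))
  have hmapeq : (runsAux s.toList []).map segV = (runsAux s.toList []).map segVA := by
    apply List.map_congr_left
    intro seg hseg
    exact segV_eq_segVA seg (hcons seg hseg)
  rw [hmapeq]
  have hb := bridge s.toList []
  simp only [List.reverse_nil, show segVA ([] : List Char) = 0 from rfl] at hb
  rw [maxD_eq_foldl _ (by
    intro x hx
    obtain ⟨seg, _, rfl⟩ := List.mem_map.mp hx
    exact segVA_nonneg seg)]
  have hnn := le_foldl_max0 ((runsAux s.toList []).map segVA) 0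
  rw [← hb] at hnn ⊢
  split_ifs <;> omega
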